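-- pv_equiv track=rewrite | github.com/somm12/codingTest | 15주차_프로그래머스_lv1/42840.py | solution
-- ===== SOURCE A (Python) =====
-- def solution(answers):
--     answer = []
--     ans = []
--     f = [1,2,3,4,5]
--     s = [2,1,2,3,2,4,2,5]
--     t = [3,3,1,1,2,2,4,4,5,5]
--     f_cnt = 0
--     s_cnt = 0
--     t_cnt = 0
--     for i in range(len(answers)):
--         if f[i%len(f)] == answers[i]:
--             f_cnt += 1
--         if s[i%len(s)] == answers[i]:
--             s_cnt += 1
--         if t[i%len(t)] == answers[i]:
--             t_cnt += 1
--     answer = [f_cnt,s_cnt,t_cnt]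
--     for i in range(3):
--         if answer[i] == max(answer):
--             ans.append(i+1)
--
--     return ans
-- ===== SOURCE B (Python) =====
-- def solution(answers):
--     # Histogram approach: the three patterns have periods 5, 8, 10, all dividing 40,
--     # so an answer's contribution to every pattern depends only on (index % 40, value).
--     # Build that histogram in one pass, then score each pattern by 40 table lookups.
--     tally = {}
--     for i, a in enumerate(answers):
--         k = (i % 40, a)
--         tally[k] = tally.get(k, 0) + 1
--     patterns = [[1, 2, 3, 4, 5],
--                 [2, 1, 2, 3, 2, 4, 2, 5],
--                 [3, 3, 1, 1, 2, 2, 4, 4, 5, 5]]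
--     scores = [sum(tally.get((r, p[r % len(p)]), 0) for r in range(40))
--               for p in patterns]
--     best = max(scores)
--     return [i + 1 for i, s in enumerate(scores) if s == best]
-- ===== Notes on version B (the rewrite author's own statement) =====
-- stated objective: alternative
-- what changed: B never compares answers against the patterns element by element: it builds a histogram keyed by (index mod 40, answer) in one pattern-free pass, then scores each pattern with 40 table lookups (periods 5, 8, 10 all divide 40), while A runs one interleaved loop testing all three patterns at every index.
import Mathlib
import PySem

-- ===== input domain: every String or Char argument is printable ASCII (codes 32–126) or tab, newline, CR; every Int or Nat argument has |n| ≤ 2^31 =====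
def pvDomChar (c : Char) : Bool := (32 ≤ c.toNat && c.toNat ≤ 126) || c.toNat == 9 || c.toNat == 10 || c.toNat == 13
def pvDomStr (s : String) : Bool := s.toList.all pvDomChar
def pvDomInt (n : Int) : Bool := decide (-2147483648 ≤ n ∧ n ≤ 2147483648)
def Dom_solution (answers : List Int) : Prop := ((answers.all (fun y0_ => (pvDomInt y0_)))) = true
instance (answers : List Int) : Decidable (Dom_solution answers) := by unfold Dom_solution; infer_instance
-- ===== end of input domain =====

-- B scores by a histogram keyed by (index mod 40, answer) built in one pattern-free pass,
-- then 40 table lookups per pattern (the periods 5, 8, 10 all divide 40); same O(n) cost.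

-- ===== PORT A =====
-- literal port of A: one pass over range(len(answers)) updating three counters,
-- then a loop over range(3) comparing each counter with max(answer).
def solution (answers : List Int) : List Int :=
  let f : List Int := [1, 2, 3, 4, 5]
  let s : List Int := [2, 1, 2, 3, 2, 4, 2, 5]
  let t : List Int := [3, 3, 1, 1, 2, 2, 4, 4, 5, 5]
  let c :=
    (PySem.List.pyRange 0 (answers.length : Int) 1).foldl
      (fun (c : Int × Int × Int) i =>
        let a := PySem.List.pyGetD answers i 0
        let c1 := if PySem.List.pyGetD f (PySem.Int.mod i (f.length : Int)) 0 = a then c.1 + 1 else c.1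
        let c2 := if PySem.List.pyGetD s (PySem.Int.mod i (s.length : Int)) 0 = a then c.2.1 + 1 else c.2.1
        let c3 := if PySem.List.pyGetD t (PySem.Int.mod i (t.length : Int)) 0 = a then c.2.2 + 1 else c.2.2
        (c1, c2, c3))
      (0, 0, 0)
  let answer : List Int := [c.1, c.2.1, c.2.2]
  (PySem.List.pyRange 0 3 1).foldl
    (fun ans i =>
      if PySem.List.pyGet? answer i = PySem.List.max? answer (fun x => x) then ans ++ [i + 1] else ans)
    []

-- ===== PORT B =====
-- tally[(i % 40, a)] = tally.get(k, 0) + 1 over enumerate(answers), then per-pattern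
-- score = sum(tally.get((r, p[r % len(p)]), 0) for r in range(40))
def solution_alt (answers : List Int) : List Int :=
  let tally :=
    (PySem.List.enumerate answers 0).foldl
      (fun (d : PySem.Dict (Int × Int) Int) ia =>
        let k := (PySem.Int.mod ia.1 40, ia.2)
        d.insert k (d.getD k 0 + 1))
      PySem.Dict.empty
  let patterns : List (List Int) :=
    [[1, 2, 3, 4, 5], [2, 1, 2, 3, 2, 4, 2, 5], [3, 3, 1, 1, 2, 2, 4, 4, 5, 5]]
  let scores := patterns.map (fun p =>
    ((PySem.List.pyRange 0 40 1).map
      (fun r => tally.getD (r, PySem.List.pyGetD p (PySem.Int.mod r (p.length : Int)) 0) 0)).sum)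
  match PySem.List.max? scores (fun x => x) with
  | none => []  -- unreachable: scores always has three elements
  | some best =>
      ((PySem.List.enumerate scores 0).filter (fun is => is.2 == best)).map (fun is => is.1 + 1)

-- ===== PRECONDITION & SPEC =====
def Spec_solution (answers : List Int) (out : List Int) : Prop := out = solution_alt answers
instance (answers : List Int) (out : List Int) : Decidable (Spec_solution answers out) := by unfold Spec_solution; infer_instance

-- ===== CLAIM (what is proved, stated in full; the proofs are below) =====
def Claim_equal_solution : Prop := ∀ (answers : List Int), Dom_solution answers → Spec_solution answers (solution answers)

-- ===== LEMMAS AND PROOFS =====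

-- A's counting loop, rewritten over enumerate, computes the three per-pattern scores.
theorem pv_count_eq (P1 P2 P3 : List Int) :
    ∀ (L : List (Int × Int)) (c : Int × Int × Int),
      L.foldl
        (fun (c : Int × Int × Int) ia =>
          (if PySem.List.pyGetD P1 (PySem.Int.mod ia.1 (P1.length : Int)) 0 = ia.2 then c.1 + 1 else c.1,
           if PySem.List.pyGetD P2 (PySem.Int.mod ia.1 (P2.length : Int)) 0 = ia.2 then c.2.1 + 1 else c.2.1,
           if PySem.List.pyGetD P3 (PySem.Int.mod ia.1 (P3.length : Int)) 0 = ia.2 then c.2.2 + 1 else c.2.2)) c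
      = (c.1 + ((L.map (fun ia => if PySem.List.pyGetD P1 (PySem.Int.mod ia.1 (P1.length : Int)) 0 = ia.2 then (1:Int) else 0)).sum),
         c.2.1 + ((L.map (fun ia => if PySem.List.pyGetD P2 (PySem.Int.mod ia.1 (P2.length : Int)) 0 = ia.2 then (1:Int) else 0)).sum),
         c.2.2 + ((L.map (fun ia => if PySem.List.pyGetD P3 (PySem.Int.mod ia.1 (P3.length : Int)) 0 = ia.2 then (1:Int) else 0)).sum)) := by
  intro L
  induction L with
  | nil => intro c; simp
  | cons hd tl ih =>
      intro c
      simp only [List.foldl_cons, List.map_cons, List.sum_cons, ih]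
      split_ifs <;> simp [Prod.ext_iff] <;> omega

-- a one-hot sum over pyRange below the point m is zero
theorem pv_onehot_zero (q : Int → Int) (v : Int) :
    ∀ (n : Nat) (a m : Int), m < a →
      (((PySem.List.pyRange a (a + n) 1).map
          (fun r => if ((m, v) : Int × Int) = (r, q r) then (1:Int) else 0)).sum) = 0 := by
  intro n
  induction n with
  | zero => intro a m _; simp [PySem.List.pyRange]
  | succ k ih =>
      intro a m hm
      rw [PySem.List.pyRange_one_cons (by omega)]
      have : a + 1 + (k : Int) = a + (k + 1 : Nat) := by push_cast; ring
      simp only [List.map_cons, List.sum_cons]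
      rw [show (a + ((k : Nat) + 1 : Nat) : Int) = (a + 1) + (k : Nat) by push_cast; ring]
      rw [ih (a + 1) m (by omega)]
      have : ¬ ((m, v) : Int × Int) = (a, q a) := by
        intro h; exact absurd (congrArg Prod.fst h) (by simpa using (by omega : m ≠ a))
      simp [this]

-- the one-hot sum over pyRange a (a+n) 1 picks out exactly r = m
theorem pv_onehot (q : Int → Int) (v : Int) :
    ∀ (n : Nat) (a m : Int), a ≤ m → m < a + n →
      (((PySem.List.pyRange a (a + n) 1).map
          (fun r => if ((m, v) : Int × Int) = (r, q r) then (1:Int) else 0)).sum)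
      = if v = q m then 1 else 0 := by
  intro n
  induction n with
  | zero => intro a m h1 h2; omega
  | succ k ih =>
      intro a m h1 h2
      rw [PySem.List.pyRange_one_cons (by omega)]
      simp only [List.map_cons, List.sum_cons]
      rw [show (a + ((k : Nat) + 1 : Nat) : Int) = (a + 1) + (k : Nat) by push_cast; ring]
      by_cases hm : m = a
      · subst hm
        rw [pv_onehot_zero q v k (m + 1) m (by omega)]
        by_cases hv : v = q m
        · simp [hv]
        · have : ¬ ((m, v) : Int × Int) = (m, q m) := by
            intro h; exact hv (congrArg Prod.snd h)
          simp [this, hv]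
      · rw [ih (a + 1) m (by omega) (by push_cast at h2 ⊢; omega)]
        have : ¬ ((m, v) : Int × Int) = (a, q a) := by
          intro h; exact hm (congrArg Prod.fst h)
        simp [this]

-- summing the histogram's counts along (r, q r) over r ∈ range(40) recovers the direct 0/1 sum
theorem pv_hist (q : Int → Int) (L : List (Int × Int)) :
    ((PySem.List.pyRange 0 40 1).map
        (fun r => ((L.map (fun ia => ((PySem.Int.mod ia.1 40, ia.2) : Int × Int))).count (r, q r) : Int))).sum
    = (L.map (fun ia => if q (PySem.Int.mod ia.1 40) = ia.2 then (1:Int) else 0)).sum := by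
  induction L with
  | nil => simp
  | cons hd tl ih =>
      simp only [List.map_cons, List.count_cons, List.sum_cons]
      push_cast
      rw [PySem.List.sum_map_add_int]
      rw [show ∀ g : Int → Int, ((PySem.List.pyRange 0 40 1).map g).sum =
            ((PySem.List.pyRange 0 40 1).map g).sum from fun _ => rfl]
      have hmod : 0 ≤ PySem.Int.mod hd.1 40 ∧ PySem.Int.mod hd.1 40 < 40 := by
        rw [PySem.Int.mod_eq_emod_of_pos (by omega)]
        exact ⟨Int.emod_nonneg _ (by omega), Int.emod_lt_of_pos _ (by omega)⟩
      have h1 :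
          ((PySem.List.pyRange 0 40 1).map
            (fun r => if ((r, q r) : Int × Int) = (PySem.Int.mod hd.1 40, hd.2) then (1:Int) else 0)).sum
          = if hd.2 = q (PySem.Int.mod hd.1 40) then 1 else 0 := by
        have := pv_onehot q hd.2 40 0 (PySem.Int.mod hd.1 40) hmod.1 (by simpa using hmod.2)
        rw [show ((0 : Int) + (40 : Nat)) = 40 by norm_num] at this
        rw [← this]
        apply congrArg List.sum
        apply List.map_congr_left
        intro r _
        simp [eq_comm]
      rw [ih]
      have h2 :
          ((PySem.List.pyRange 0 40 1).map
            (fun r => if (((PySem.Int.mod hd.1 40, hd.2) : Int × Int) == (r, q r)) = true then (1:Int) else 0)).sum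
          = if hd.2 = q (PySem.Int.mod hd.1 40) then 1 else 0 := by
        rw [← h1]
        apply congrArg List.sum
        apply List.map_congr_left
        intro r _
        simp only [beq_iff_eq, Prod.mk.injEq]
        refine if_congr ?_ rfl rfl
        constructor <;> rintro ⟨ha, hb⟩ <;> exact ⟨ha.symm, hb.symm⟩
      rw [h2]
      by_cases h : q (PySem.Int.mod hd.1 40) = hd.2
      · rw [if_pos h, if_pos h.symm]; ring
      · rw [if_neg h, if_neg (fun hh => h hh.symm)]; ring

-- per-pattern: B's 40 histogram lookups equal the direct enumerate 0/1 sum, for a period dividing 40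
theorem pv_score_eq (p : List Int) (hdvd : ((p.length : Int)) ∣ 40) (hpos : 0 < (p.length : Int))
    (answers : List Int) :
    ((PySem.List.pyRange 0 40 1).map
      (fun r =>
        (((PySem.List.enumerate answers 0).foldl
            (fun (d : PySem.Dict (Int × Int) Int) ia =>
              let k := ((PySem.Int.mod ia.1 40, ia.2) : Int × Int)
              d.insert k (d.getD k 0 + 1))
            PySem.Dict.empty).getD
          (r, PySem.List.pyGetD p (PySem.Int.mod r (p.length : Int)) 0) 0))).sum
    = ((PySem.List.enumerate answers 0).map
        (fun ia => if PySem.List.pyGetD p (PySem.Int.mod ia.1 (p.length : Int)) 0 = ia.2 then (1:Int) else 0)).sum := by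
  set L := PySem.List.enumerate answers 0 with hL
  set q : Int → Int := fun r => PySem.List.pyGetD p (PySem.Int.mod r (p.length : Int)) 0 with hq
  have hfold :
      (L.foldl (fun (d : PySem.Dict (Int × Int) Int) ia =>
          let k := ((PySem.Int.mod ia.1 40, ia.2) : Int × Int)
          d.insert k (d.getD k 0 + 1)) PySem.Dict.empty)
      = PySem.Dict.counter (L.map (fun ia => ((PySem.Int.mod ia.1 40, ia.2) : Int × Int))) := by
    rw [← PySem.Dict.foldl_insert_getD_add_one_eq_counter, List.foldl_map]
  rw [hfold]
  have hget : ∀ r : Int,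
      (PySem.Dict.counter (L.map (fun ia => ((PySem.Int.mod ia.1 40, ia.2) : Int × Int)))).getD (r, q r) 0
      = ((L.map (fun ia => ((PySem.Int.mod ia.1 40, ia.2) : Int × Int))).count (r, q r) : Int) := by
    intro r; exact PySem.Dict.getD_counter _ _
  calc
    _ = ((PySem.List.pyRange 0 40 1).map
          (fun r => ((L.map (fun ia => ((PySem.Int.mod ia.1 40, ia.2) : Int × Int))).count (r, q r) : Int))).sum := by
        apply congrArg List.sum
        exact List.map_congr_left (fun r _ => hget r)
    _ = (L.map (fun ia => if q (PySem.Int.mod ia.1 40) = ia.2 then (1:Int) else 0)).sum := pv_hist q L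
    _ = _ := by
        apply congrArg List.sum
        apply List.map_congr_left
        intro ia _
        have : q (PySem.Int.mod ia.1 40) = q ia.1 := by
          simp only [hq]
          congr 1
          rw [PySem.Int.mod_eq_emod_of_pos (by omega : (0:Int) < 40),
              PySem.Int.mod_eq_emod_of_pos hpos, PySem.Int.mod_eq_emod_of_pos hpos,
              Int.emod_emod_of_dvd _ hdvd]
        rw [this]

-- the three-element final stage: A's range(3) scan against B's max/filter/map comprehension
set_option maxRecDepth 4000 in
theorem pv_final (a b c : Int) :
    (PySem.List.pyRange 0 3 1).foldl
      (fun ans i =>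
        if PySem.List.pyGet? [a, b, c] i = PySem.List.max? [a, b, c] (fun x => x) then ans ++ [i + 1] else ans)
      []
    = (match PySem.List.max? [a, b, c] (fun x => x) with
       | none => []
       | some best =>
           ((PySem.List.enumerate [a, b, c] 0).filter (fun is => is.2 == best)).map (fun is => is.1 + 1)) := by
  rw [show PySem.List.pyRange 0 3 1 = [0, 1, 2] from by rfl]
  rw [PySem.List.max?_id_cons]
  have g0 : PySem.List.pyGet? [a, b, c] 0 = some a := PySem.List.pyGet?_zero_cons a [b, c]
  have g1 : PySem.List.pyGet? [a, b, c] 1 = some b := by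
    rw [show (1 : Int) = ((1 : Nat) : Int) by norm_num, PySem.List.pyGet?_natCast]; rfl
  have g2 : PySem.List.pyGet? [a, b, c] 2 = some c := by
    rw [show (2 : Int) = ((2 : Nat) : Int) by norm_num, PySem.List.pyGet?_natCast]; rfl
  simp only [List.foldl_cons, List.foldl_nil]
  simp only [g0, g1, g2, Option.some.injEq]
  simp only [PySem.List.enumerate_cons, PySem.List.enumerate_nil, List.filter_cons,
    List.filter_nil, beq_iff_eq]
  split_ifs <;> simp

-- ===== VERDICT (by name: the statement is the Claim_ definition above) =====
theorem solution_spec : Claim_equal_solution := by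
  intro answers _
  unfold Spec_solution solution solution_alt
  dsimp only
  have hmap := PySem.List.enumerate_eq_map_pyRange answers (0 : Int)
  simp only [PySem.List.len_eq] at hmap
  have hA :
      (PySem.List.pyRange 0 (answers.length : Int) 1).foldl
        (fun (c : Int × Int × Int) i =>
          (if PySem.List.pyGetD ([1,2,3,4,5] : List Int) (PySem.Int.mod i (([1,2,3,4,5] : List Int).length : Int)) 0 = PySem.List.pyGetD answers i 0 then c.1 + 1 else c.1,
           if PySem.List.pyGetD ([2,1,2,3,2,4,2,5] : List Int) (PySem.Int.mod i (([2,1,2,3,2,4,2,5] : List Int).length : Int)) 0 = PySem.List.pyGetD answers i 0 then c.2.1 + 1 else c.2.1,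
           if PySem.List.pyGetD ([3,3,1,1,2,2,4,4,5,5] : List Int) (PySem.Int.mod i (([3,3,1,1,2,2,4,4,5,5] : List Int).length : Int)) 0 = PySem.List.pyGetD answers i 0 then c.2.2 + 1 else c.2.2))
        (0, 0, 0)
      = (((PySem.List.enumerate answers 0).map (fun ia => if PySem.List.pyGetD ([1,2,3,4,5] : List Int) (PySem.Int.mod ia.1 (([1,2,3,4,5] : List Int).length : Int)) 0 = ia.2 then (1:Int) else 0)).sum,
         ((PySem.List.enumerate answers 0).map (fun ia => if PySem.List.pyGetD ([2,1,2,3,2,4,2,5] : List Int) (PySem.Int.mod ia.1 (([2,1,2,3,2,4,2,5] : List Int).length : Int)) 0 = ia.2 then (1:Int) else 0)).sum,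
         ((PySem.List.enumerate answers 0).map (fun ia => if PySem.List.pyGetD ([3,3,1,1,2,2,4,4,5,5] : List Int) (PySem.Int.mod ia.1 (([3,3,1,1,2,2,4,4,5,5] : List Int).length : Int)) 0 = ia.2 then (1:Int) else 0)).sum) := by
    calc
      _ = ((PySem.List.pyRange 0 (answers.length : Int) 1).map (fun j => (j, PySem.List.pyGetD answers j 0))).foldl
            (fun (c : Int × Int × Int) (ia : Int × Int) =>
              (if PySem.List.pyGetD ([1,2,3,4,5] : List Int) (PySem.Int.mod ia.1 (([1,2,3,4,5] : List Int).length : Int)) 0 = ia.2 then c.1 + 1 else c.1,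
               if PySem.List.pyGetD ([2,1,2,3,2,4,2,5] : List Int) (PySem.Int.mod ia.1 (([2,1,2,3,2,4,2,5] : List Int).length : Int)) 0 = ia.2 then c.2.1 + 1 else c.2.1,
               if PySem.List.pyGetD ([3,3,1,1,2,2,4,4,5,5] : List Int) (PySem.Int.mod ia.1 (([3,3,1,1,2,2,4,4,5,5] : List Int).length : Int)) 0 = ia.2 then c.2.2 + 1 else c.2.2))
            (0, 0, 0) := by rw [List.foldl_map]
      _ = _ := by
            rw [← hmap, pv_count_eq]
            norm_num
  rw [hA]
  have h1 := pv_score_eq [1,2,3,4,5] (by norm_num) (by norm_num) answers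
  have h2 := pv_score_eq [2,1,2,3,2,4,2,5] (by norm_num) (by norm_num) answers
  have h3 := pv_score_eq [3,3,1,1,2,2,4,4,5,5] (by norm_num) (by norm_num) answers
  simp only [List.map_cons, List.map_nil]
  rw [h1, h2, h3]
  exact pv_final _ _ _
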